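/- GENERATED by farm/mkstatement.py from design/units.split.tsv — do not edit.
   THE SPLIT of the proof unit `start_decoder.F6` into `start_decoder.F6a`, `start_decoder.F6b`, `start_decoder.F6c`, `start_decoder.F6d`: the children's statements give the parent's
   UNCHANGED statement (so nothing above the parent — callers, compositions — is touched by the split). -/
import Vorbis.Spec.StartDecoderF6
import Vorbis.Spec.Units.start_decoder_F6
import Vorbis.Spec.Units.start_decoder_F6a
import Vorbis.Spec.Units.start_decoder_F6b
import Vorbis.Spec.Units.start_decoder_F6c
import Vorbis.Spec.Units.start_decoder_F6d
namespace Vorbis.Spec.Splits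
open X86 X86.User Asan

/-- The children of the split unit `start_decoder.F6` prove it, by `Vorbis.Spec.StartDecoder.SegF6.of_parts`. -/
theorem start_decoder_F6
    (h_start_decoder_F6a : Vorbis.Spec.start_decoder_F6a.Statement)
    (h_start_decoder_F6b : Vorbis.Spec.start_decoder_F6b.Statement)
    (h_start_decoder_F6c : Vorbis.Spec.start_decoder_F6c.Statement)
    (h_start_decoder_F6d : Vorbis.Spec.start_decoder_F6d.Statement) :
    Vorbis.Spec.start_decoder_F6.Statement := by
  intro Lay _hLay μ _hμ u₀ _hcode _h_asan_load2_noabort _h_asan_store2_noabort _h_asan_load4_noabort _h_qsort _h_error _h_asan_store1_noabort _h_point_compare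
  apply Vorbis.Spec.StartDecoder.SegF6.of_parts
  · exact h_start_decoder_F6a Lay _hLay μ _hμ u₀ _hcode
  · exact h_start_decoder_F6b Lay _hLay μ _hμ u₀ _hcode _h_asan_load2_noabort _h_asan_store2_noabort _h_asan_load4_noabort _h_qsort _h_point_compare
  · exact h_start_decoder_F6c Lay _hLay μ _hμ u₀ _hcode _h_asan_load2_noabort _h_asan_load4_noabort _h_error
  · exact h_start_decoder_F6d Lay _hLay μ _hμ u₀ _hcode _h_asan_load2_noabort _h_asan_store1_noabort

end Vorbis.Spec.Splits
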